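-- pv_equiv track=rewrite | github.com/vardhin/mler | port.py | evaluate_prediction
-- ===== SOURCE A (Python) =====
-- def evaluate_prediction(predictions, actual):
--     """Evaluate prediction accuracy and find closest match"""
--     actual_port = actual['port']
--
--     closest_match = None
--     min_distance = float('inf')
--     exact_match = None
--
--     for i, pred in enumerate(predictions):
--         pred_port = pred['port']
--         distance = abs(actual_port - pred_port)
--
--         if distance < min_distance:
--             min_distance = distance
--             closest_match = (i, pred)
--
--         if pred_port == actual_port:
--             exact_match = (i, pred)
--
--     return exact_match, closest_match
-- ===== SOURCE B (Python) =====
-- def evaluate_prediction(predictions, actual):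
--     """Evaluate prediction accuracy and find closest match"""
--     target = actual['port']
--     if not predictions:
--         return None, None
--     closest_match = min(enumerate(predictions), key=lambda x: abs(target - x[1]['port']))
--     exact_match = next(((i, p) for i, p in reversed(list(enumerate(predictions))) if p['port'] == target), None)
--     return exact_match, closest_match
-- ===== Notes on version B (the rewrite author's own statement) =====
-- stated objective: simpler
-- what changed: Replaces A's single fused loop carrying three accumulators (closest, min_distance, exact) with an empty guard plus two independent scans: min(enumerate(...), key=abs distance) for the first-minimum closest match and a reversed-enumerate first match for the last exact match.
import Mathlib
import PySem

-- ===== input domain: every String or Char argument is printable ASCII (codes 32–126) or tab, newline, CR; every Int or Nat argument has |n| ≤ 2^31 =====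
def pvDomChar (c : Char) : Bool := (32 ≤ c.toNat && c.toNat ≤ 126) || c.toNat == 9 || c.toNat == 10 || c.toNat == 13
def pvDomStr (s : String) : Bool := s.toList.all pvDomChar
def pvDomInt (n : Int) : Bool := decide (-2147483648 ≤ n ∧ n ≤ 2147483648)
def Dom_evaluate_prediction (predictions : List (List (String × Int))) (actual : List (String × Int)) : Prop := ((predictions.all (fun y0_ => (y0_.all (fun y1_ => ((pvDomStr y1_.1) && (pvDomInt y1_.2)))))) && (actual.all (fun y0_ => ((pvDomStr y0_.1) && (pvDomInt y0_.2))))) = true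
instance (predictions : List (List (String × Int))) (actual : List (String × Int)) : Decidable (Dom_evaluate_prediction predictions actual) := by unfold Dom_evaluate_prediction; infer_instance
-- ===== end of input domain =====

-- B replaces A's single fused loop (three accumulators: closest, min_distance, exact) by an
-- empty guard plus two independent scans: min(enumerate, key) for the closest match and a
-- reversed-scan first match for the last exact match; equal cost, simpler decomposition.

-- ===== PORT A =====
-- pred['port'] : Python raises KeyError when the key is absent; such inputs are outside
-- Pre_evaluate_prediction, so the default 0 is never observed inside the claim.
def pvPortA (pred : List (String × Int)) : Int :=
  PySem.Dict.getD (PySem.Dict.mk pred) "port" 0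

-- one iteration of A's loop: update (closest_match, min_distance) with strict '<'
-- (min_distance = none models the initial float('inf')), then overwrite exact_match on equality
def pvStepA (ap : Int)
    (st : Option (Int × List (String × Int)) × Option Int × Option (Int × List (String × Int)))
    (x : Int × List (String × Int)) :
    Option (Int × List (String × Int)) × Option Int × Option (Int × List (String × Int)) :=
  let pp := pvPortA x.2
  let d := |ap - pp|
  let cmmd := if (match st.2.1 with | none => true | some m => decide (d < m)) then
      ((some x : Option (Int × List (String × Int))), (some d : Option Int)) else (st.1, st.2.1)
  let em := if pp == ap then some x else st.2.2
  (cmmd.1, cmmd.2, em)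

def evaluate_prediction (predictions : List (List (String × Int))) (actual : List (String × Int)) : (Option (Int × (List (String × Int)))) × (Option (Int × (List (String × Int)))) :=
  match (PySem.Dict.mk actual).get? "port" with
  | none => (none, none)   -- actual['port'] raises KeyError: outside Pre_evaluate_prediction
  | some ap =>
    let st := (PySem.List.enumerate predictions 0).foldl (pvStepA ap) (none, none, none)
    (st.2.2, st.1)

-- ===== PORT B =====
-- same KeyError note as pvPortA: inputs with a missing 'port' key are outside Pre_evaluate_prediction
def pvPortB (pred : List (String × Int)) : Int :=
  PySem.Dict.getD (PySem.Dict.mk pred) "port" 0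

def evaluate_prediction_alt (predictions : List (List (String × Int))) (actual : List (String × Int)) : (Option (Int × (List (String × Int)))) × (Option (Int × (List (String × Int)))) :=
  match (PySem.Dict.mk actual).get? "port" with
  | none => (none, none)   -- actual['port'] raises KeyError: outside Pre_evaluate_prediction
  | some target =>
    if predictions.isEmpty then (none, none)
    else
      let closest_match := PySem.List.min? (PySem.List.enumerate predictions 0)
        (fun x => |target - pvPortB x.2|)
      let exact_match := (PySem.List.enumerate predictions 0).reverse.find?
        (fun x => pvPortB x.2 == target)
      (exact_match, closest_match)

-- ===== PRECONDITION & SPEC =====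
-- Pre_ excludes exactly the inputs where the Python raises KeyError: 'port' missing from
-- actual or from some prediction.
def Pre_evaluate_prediction (predictions : List (List (String × Int))) (actual : List (String × Int)) : Prop :=
  ((PySem.Dict.mk actual).get? "port").isSome = true ∧
  ∀ pred ∈ predictions, ((PySem.Dict.mk pred).get? "port").isSome = true
instance (predictions : List (List (String × Int))) (actual : List (String × Int)) : Decidable (Pre_evaluate_prediction predictions actual) := by unfold Pre_evaluate_prediction; infer_instance

def pvWitness_evaluate_prediction : (List (List (String × Int))) × (List (String × Int)) :=
  ([[("port", 8080)], [("port", 80)]], [("port", 80)])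

def Spec_evaluate_prediction (predictions : List (List (String × Int))) (actual : List (String × Int)) (out : (Option (Int × (List (String × Int)))) × (Option (Int × (List (String × Int))))) : Prop := out = evaluate_prediction_alt predictions actual
instance (predictions : List (List (String × Int))) (actual : List (String × Int)) (out : (Option (Int × (List (String × Int)))) × (Option (Int × (List (String × Int))))) : Decidable (Spec_evaluate_prediction predictions actual out) := by unfold Spec_evaluate_prediction; infer_instance

-- ===== CLAIM (what is proved, stated in full; the proofs are below) =====
def Claim_equal_evaluate_prediction : Prop := ∀ (predictions : List (List (String × Int))) (actual : List (String × Int)), Dom_evaluate_prediction predictions actual → Pre_evaluate_prediction predictions actual → Spec_evaluate_prediction predictions actual (evaluate_prediction predictions actual)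

-- ===== LEMMAS AND PROOFS =====

-- last-match-wins overwrite loop = first match of the reversed list (with leftover accumulator)
lemma foldl_overwrite_eq_find_reverse {α : Type} (p : α → Bool) :
    ∀ (l : List α) (em : Option α),
      l.foldl (fun e x => if p x then some x else e) em
        = match l.reverse.find? p with | some y => some y | none => em := by
  intro l
  induction l with
  | nil => intro em; rfl
  | cons x xs ih =>
    intro em
    simp only [List.foldl_cons, ih, List.reverse_cons, List.find?_append]
    cases h : xs.reverse.find? p
    · simp [Option.or]; split <;> simp
    · simp [Option.or]

-- A's fused loop, split: first component is min?'s running fold, second its key,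
-- third the overwrite loop for the exact match
lemma foldl_stepA_eq (ap : Int) :
    ∀ (l : List (Int × List (String × Int)))
      (acc em : Option (Int × List (String × Int))),
      l.foldl (pvStepA ap) (acc, acc.map (fun x => |ap - pvPortA x.2|), em)
        = (l.foldl (fun a x =>
              match a with
              | none => some x
              | some m => if (fun y => |ap - pvPortA y.2|) x < (fun y => |ap - pvPortA y.2|) m
                          then some x else some m) acc,
           (l.foldl (fun a x =>
              match a with
              | none => some x
              | some m => if (fun y => |ap - pvPortA y.2|) x < (fun y => |ap - pvPortA y.2|) m
                          then some x else some m) acc).map (fun x => |ap - pvPortA x.2|),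
           l.foldl (fun e x => if pvPortA x.2 == ap then some x else e) em) := by
  intro l
  induction l with
  | nil => intro acc em; rfl
  | cons x xs ih =>
    intro acc em
    cases acc with
    | none =>
      simp only [List.foldl_cons]
      rw [show pvStepA ap (none, Option.map _ none, em) x
            = (some x, (some x).map (fun y => |ap - pvPortA y.2|), if pvPortA x.2 == ap then some x else em)
          from by simp [pvStepA]]
      exact ih _ _
    | some m =>
      simp only [List.foldl_cons]
      by_cases h : |ap - pvPortA x.2| < |ap - pvPortA m.2|
      · rw [show pvStepA ap (some m, Option.map (fun y => |ap - pvPortA y.2|) (some m), em) x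
              = (some x, (some x).map (fun y => |ap - pvPortA y.2|), if pvPortA x.2 == ap then some x else em)
            from by simp [pvStepA, h]]
        rw [ih]
        simp [h]
      · rw [show pvStepA ap (some m, Option.map (fun y => |ap - pvPortA y.2|) (some m), em) x
              = (some m, Option.map (fun y => |ap - pvPortA y.2|) (some m), if pvPortA x.2 == ap then some x else em)
            from by simp [pvStepA, h]]
        rw [ih]
        simp [h]

-- ===== VERDICT (by name: the statement is the Claim_ definition above) =====
theorem evaluate_prediction_spec : Claim_equal_evaluate_prediction := by
  intro predictions actual _ _
  unfold Spec_evaluate_prediction evaluate_prediction evaluate_prediction_alt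
  cases h : (PySem.Dict.mk actual).get? "port" with
  | none => rfl
  | some ap =>
    cases predictions with
    | nil => rfl
    | cons q qs =>
      simp only [List.isEmpty_cons]
      have hfold := foldl_stepA_eq ap (PySem.List.enumerate (q :: qs) 0) none none
      simp only [Option.map_none] at hfold
      rw [hfold]
      have hmin : PySem.List.min? (PySem.List.enumerate (q :: qs) 0) (fun x => |ap - pvPortB x.2|)
          = (PySem.List.enumerate (q :: qs) 0).foldl (fun a x =>
              match a with
              | none => some x
              | some m => if (fun y => |ap - pvPortA y.2|) x < (fun y => |ap - pvPortA y.2|) m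
                          then some x else some m) none := by
        rw [show pvPortB = pvPortA from rfl]
        unfold PySem.List.min?
        congr 1
        funext a x
        cases a <;> rfl
      have hex := foldl_overwrite_eq_find_reverse
        (fun (x : Int × List (String × Int)) => pvPortA x.2 == ap)
        (PySem.List.enumerate (q :: qs) 0) none
      rw [hmin, hex, show pvPortB = pvPortA from rfl]
      cases (PySem.List.enumerate (q :: qs) 0).reverse.find?
          (fun x => pvPortA x.2 == ap) <;> rfl
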